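-- pv_equiv track=rewrite | github.com/DrFreud1/Acme | acme.py | calculate_payment
-- ===== SOURCE A (Python) =====
-- morning_range = range(0,9)
--
-- afternoon_range = range(9,19)
--
-- night_range = range(18,25)
--
-- def IsWeekend(day):
--     flag = True
--     current_day = day[0:2]
--     if current_day == 'MO' or current_day == 'TU' or current_day == 'WE' or current_day == 'TH' or current_day == 'FR':
--         flag = False
--     return flag
--
-- def calculate_payment(working_hours):
--     payment = 0
--     for tuple in working_hours:
--         if IsWeekend(tuple[0]):
--             if tuple[1] in morning_range and tuple[2] in morning_range:
--                 payment += (tuple[2] - tuple[1]) * 30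
--             elif tuple[1] in afternoon_range and tuple[2] in afternoon_range:
--                 payment += (tuple[2] - tuple[1]) * 20
--             elif tuple[1] in night_range and tuple[2] in night_range:
--                 payment += (tuple[2] - tuple[1]) * 25
--         elif not IsWeekend(tuple[0]):
--             if tuple[1] in morning_range and tuple[2] in morning_range:
--                 payment += (tuple[2] - tuple[1]) * 25
--             elif tuple[1] in afternoon_range and tuple[2] in afternoon_range:
--                 payment += (tuple[2] - tuple[1]) * 15
--             elif tuple[1] in night_range and tuple[2] in night_range:
--                 payment += (tuple[2] - tuple[1]) * 20
--     return payment
-- ===== SOURCE B (Python) =====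
-- WEEKDAYS = ('MO', 'TU', 'WE', 'TH', 'FR')
--
--
-- def base_rate(start, end):
--     """Weekday rate of the shift containing both endpoints, or None."""
--     if 0 <= start <= 8 and 0 <= end <= 8:
--         return 25
--     if 9 <= start <= 18 and 9 <= end <= 18:
--         return 15
--     if 18 <= start <= 24 and 18 <= end <= 24:
--         return 20
--     return None
--
--
-- def calculate_payment(working_hours):
--     # Every weekend rate is exactly the weekday rate plus a flat 5/hour premium,
--     # so: pay everything at weekday rates, then add 5/hour for payable weekend hours.
--     base = sum((e - s) * r
--                for _, s, e in working_hours
--                for r in (base_rate(s, e),) if r is not None)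
--     premium = 5 * sum(e - s
--                       for d, s, e in working_hours
--                       if base_rate(s, e) is not None and d[:2] not in WEEKDAYS)
--     return base + premium
-- ===== Notes on version B (the rewrite author's own statement) =====
-- stated objective: simpler
-- what changed: Instead of per-item branching on weekend vs weekday with two six-branch elif chains, B exploits that every weekend rate is the weekday rate plus a flat 5/hour: it makes two staged passes, summing all payable hours at weekday rates and separately adding 5 per payable weekend hour.
import Mathlib
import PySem

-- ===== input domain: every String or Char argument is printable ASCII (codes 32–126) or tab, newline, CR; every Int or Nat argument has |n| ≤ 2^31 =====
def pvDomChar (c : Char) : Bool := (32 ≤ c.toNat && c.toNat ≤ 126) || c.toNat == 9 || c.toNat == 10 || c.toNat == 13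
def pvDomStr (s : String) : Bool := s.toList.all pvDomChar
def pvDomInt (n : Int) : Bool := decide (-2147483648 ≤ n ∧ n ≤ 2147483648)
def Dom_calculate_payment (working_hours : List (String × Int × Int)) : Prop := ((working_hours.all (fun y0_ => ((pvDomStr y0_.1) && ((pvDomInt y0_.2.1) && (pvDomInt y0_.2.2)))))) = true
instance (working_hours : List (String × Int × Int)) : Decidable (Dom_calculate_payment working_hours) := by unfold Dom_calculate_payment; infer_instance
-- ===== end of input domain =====

-- B replaces A's duplicated weekend/weekday elif chains with two staged passes: all payable
-- hours at weekday rates plus a flat 5/hour weekend premium; same return value.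
-- ===== PORT A =====
def pvIsWeekend (day : String) : Bool :=
  let current_day := PySem.List.slice day.toList (some 0) (some 2)
  if current_day = "MO".toList ∨ current_day = "TU".toList ∨ current_day = "WE".toList ∨
     current_day = "TH".toList ∨ current_day = "FR".toList then false else true

def calculate_payment (working_hours : List (String × Int × Int)) : Int :=
  working_hours.foldl (fun payment t =>
    if pvIsWeekend t.1 then
      if 0 ≤ t.2.1 ∧ t.2.1 < 9 ∧ 0 ≤ t.2.2 ∧ t.2.2 < 9 then payment + (t.2.2 - t.2.1) * 30
      else if 9 ≤ t.2.1 ∧ t.2.1 < 19 ∧ 9 ≤ t.2.2 ∧ t.2.2 < 19 then payment + (t.2.2 - t.2.1) * 20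
      else if 18 ≤ t.2.1 ∧ t.2.1 < 25 ∧ 18 ≤ t.2.2 ∧ t.2.2 < 25 then payment + (t.2.2 - t.2.1) * 25
      else payment
    else if !pvIsWeekend t.1 then
      if 0 ≤ t.2.1 ∧ t.2.1 < 9 ∧ 0 ≤ t.2.2 ∧ t.2.2 < 9 then payment + (t.2.2 - t.2.1) * 25
      else if 9 ≤ t.2.1 ∧ t.2.1 < 19 ∧ 9 ≤ t.2.2 ∧ t.2.2 < 19 then payment + (t.2.2 - t.2.1) * 15
      else if 18 ≤ t.2.1 ∧ t.2.1 < 25 ∧ 18 ≤ t.2.2 ∧ t.2.2 < 25 then payment + (t.2.2 - t.2.1) * 20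
      else payment
    else payment) 0

-- ===== PORT B =====
-- base_rate in Source B: weekday rate of the shift containing both endpoints, or None
def pvBaseRate (start «end» : Int) : Option Int :=
  if 0 ≤ start ∧ start ≤ 8 ∧ 0 ≤ «end» ∧ «end» ≤ 8 then some 25
  else if 9 ≤ start ∧ start ≤ 18 ∧ 9 ≤ «end» ∧ «end» ≤ 18 then some 15
  else if 18 ≤ start ∧ start ≤ 24 ∧ 18 ≤ «end» ∧ «end» ≤ 24 then some 20
  else none

def pvIsWeekday (day : String) : Bool :=
  ["MO".toList, "TU".toList, "WE".toList, "TH".toList, "FR".toList].contains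
    (PySem.List.slice day.toList none (some 2))

def calculate_payment_alt (working_hours : List (String × Int × Int)) : Int :=
  let base := (working_hours.map (fun t =>
    match pvBaseRate t.2.1 t.2.2 with
    | some r => (t.2.2 - t.2.1) * r
    | none => 0)).sum
  let premium := 5 * ((working_hours.filter (fun t =>
    (pvBaseRate t.2.1 t.2.2).isSome && !pvIsWeekday t.1)).map
      (fun t => t.2.2 - t.2.1)).sum
  base + premium

-- ===== PRECONDITION & SPEC =====
def Spec_calculate_payment (working_hours : List (String × Int × Int)) (out : Int) : Prop := out = calculate_payment_alt working_hours
instance (working_hours : List (String × Int × Int)) (out : Int) : Decidable (Spec_calculate_payment working_hours out) := by unfold Spec_calculate_payment; infer_instance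

-- ===== CLAIM =====
def Claim_equal_calculate_payment : Prop := ∀ (working_hours : List (String × Int × Int)), Dom_calculate_payment working_hours → Spec_calculate_payment working_hours (calculate_payment working_hours)

-- ===== LEMMAS AND PROOFS =====

-- A's weekend test equals the negation of B's weekday test
lemma pv_weekend_eq (s : String) : pvIsWeekend s = !pvIsWeekday s := by
  simp only [pvIsWeekend, pvIsWeekday, List.contains_cons, List.contains_nil,
    PySem.List.slice_zero_start]
  split_ifs with h
  · rcases h with h|h|h|h|h <;> simp [h]
  · push_neg at h
    obtain ⟨h1, h2, h3, h4, h5⟩ := h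
    simp only [Bool.true_eq, Bool.not_eq_eq_eq_not, Bool.not_true, Bool.or_eq_false_iff,
      beq_eq_false_iff_ne, ne_eq, List.contains_nil, Bool.not_false, and_true]
    exact ⟨fun e => h1 (e.trans (by decide)), fun e => h2 (e.trans (by decide)),
      fun e => h3 (e.trans (by decide)), fun e => h4 (e.trans (by decide)),
      fun e => h5 (e.trans (by decide))⟩

-- head contribution of B's two passes
lemma pv_alt_cons (t : String × Int × Int) (rest : List (String × Int × Int)) :
    calculate_payment_alt (t :: rest) =
      ((match pvBaseRate t.2.1 t.2.2 with
        | some r => (t.2.2 - t.2.1) * r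
        | none => 0)
       + (if (pvBaseRate t.2.1 t.2.2).isSome && !pvIsWeekday t.1
          then 5 * (t.2.2 - t.2.1) else 0))
      + calculate_payment_alt rest := by
  simp only [calculate_payment_alt, List.map_cons, List.sum_cons, List.filter_cons]
  split_ifs <;> simp <;> ring

-- rate characterization of pvBaseRate
lemma pv_rate1 (s e : Int) (h : 0 ≤ s ∧ s ≤ 8 ∧ 0 ≤ e ∧ e ≤ 8) : pvBaseRate s e = some 25 := by
  unfold pvBaseRate; rw [if_pos h]

lemma pv_rate2 (s e : Int) (h : 9 ≤ s ∧ s ≤ 18 ∧ 9 ≤ e ∧ e ≤ 18) : pvBaseRate s e = some 15 := by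
  unfold pvBaseRate; rw [if_neg (by omega), if_pos h]

lemma pv_rate3 (s e : Int) (h2 : ¬(9 ≤ s ∧ s ≤ 18 ∧ 9 ≤ e ∧ e ≤ 18))
    (h : 18 ≤ s ∧ s ≤ 24 ∧ 18 ≤ e ∧ e ≤ 24) : pvBaseRate s e = some 20 := by
  unfold pvBaseRate; rw [if_neg (by omega), if_neg h2, if_pos h]

lemma pv_rate0 (s e : Int) (h1 : ¬(0 ≤ s ∧ s ≤ 8 ∧ 0 ≤ e ∧ e ≤ 8))
    (h2 : ¬(9 ≤ s ∧ s ≤ 18 ∧ 9 ≤ e ∧ e ≤ 18))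
    (h3 : ¬(18 ≤ s ∧ s ≤ 24 ∧ 18 ≤ e ∧ e ≤ 24)) : pvBaseRate s e = none := by
  unfold pvBaseRate; rw [if_neg h1, if_neg h2, if_neg h3]

-- A's per-item amount (with weekend flag w) equals B's head contribution
lemma pv_step_core (payment s e : Int) (w : Bool) :
    (if w then
      (if 0 ≤ s ∧ s < 9 ∧ 0 ≤ e ∧ e < 9 then payment + (e - s) * 30
      else if 9 ≤ s ∧ s < 19 ∧ 9 ≤ e ∧ e < 19 then payment + (e - s) * 20
      else if 18 ≤ s ∧ s < 25 ∧ 18 ≤ e ∧ e < 25 then payment + (e - s) * 25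
      else payment)
     else if !w then
      (if 0 ≤ s ∧ s < 9 ∧ 0 ≤ e ∧ e < 9 then payment + (e - s) * 25
      else if 9 ≤ s ∧ s < 19 ∧ 9 ≤ e ∧ e < 19 then payment + (e - s) * 15
      else if 18 ≤ s ∧ s < 25 ∧ 18 ≤ e ∧ e < 25 then payment + (e - s) * 20
      else payment)
     else payment) =
    payment + ((match pvBaseRate s e with
        | some r => (e - s) * r
        | none => 0)
       + (if (pvBaseRate s e).isSome && w then 5 * (e - s) else 0)) := by
  by_cases h1 : 0 ≤ s ∧ s ≤ 8 ∧ 0 ≤ e ∧ e ≤ 8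
  · rw [pv_rate1 s e h1]
    have a1 : 0 ≤ s ∧ s < 9 ∧ 0 ≤ e ∧ e < 9 := by omega
    cases w <;> simp [a1] <;> ring
  · by_cases h2 : 9 ≤ s ∧ s ≤ 18 ∧ 9 ≤ e ∧ e ≤ 18
    · rw [pv_rate2 s e h2]
      have a1 : ¬(0 ≤ s ∧ s < 9 ∧ 0 ≤ e ∧ e < 9) := by omega
      have a2 : 9 ≤ s ∧ s < 19 ∧ 9 ≤ e ∧ e < 19 := by omega
      cases w <;> simp [a1, a2] <;> ring
    · by_cases h3 : 18 ≤ s ∧ s ≤ 24 ∧ 18 ≤ e ∧ e ≤ 24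
      · rw [pv_rate3 s e h2 h3]
        have a1 : ¬(0 ≤ s ∧ s < 9 ∧ 0 ≤ e ∧ e < 9) := by omega
        have a2 : ¬(9 ≤ s ∧ s < 19 ∧ 9 ≤ e ∧ e < 19) := by omega
        have a3 : 18 ≤ s ∧ s < 25 ∧ 18 ≤ e ∧ e < 25 := by omega
        cases w <;> simp [a1, a2, a3] <;> ring
      · rw [pv_rate0 s e h1 h2 h3]
        have a1 : ¬(0 ≤ s ∧ s < 9 ∧ 0 ≤ e ∧ e < 9) := by omega
        have a2 : ¬(9 ≤ s ∧ s < 19 ∧ 9 ≤ e ∧ e < 19) := by omega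
        have a3 : ¬(18 ≤ s ∧ s < 25 ∧ 18 ≤ e ∧ e < 25) := by omega
        cases w <;> simp [a1, a2, a3]

-- A's fold step equals adding B's head contribution
lemma pv_step_eq (payment : Int) (t : String × Int × Int) :
    (if pvIsWeekend t.1 then
      if 0 ≤ t.2.1 ∧ t.2.1 < 9 ∧ 0 ≤ t.2.2 ∧ t.2.2 < 9 then payment + (t.2.2 - t.2.1) * 30
      else if 9 ≤ t.2.1 ∧ t.2.1 < 19 ∧ 9 ≤ t.2.2 ∧ t.2.2 < 19 then payment + (t.2.2 - t.2.1) * 20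
      else if 18 ≤ t.2.1 ∧ t.2.1 < 25 ∧ 18 ≤ t.2.2 ∧ t.2.2 < 25 then payment + (t.2.2 - t.2.1) * 25
      else payment
    else if !pvIsWeekend t.1 then
      if 0 ≤ t.2.1 ∧ t.2.1 < 9 ∧ 0 ≤ t.2.2 ∧ t.2.2 < 9 then payment + (t.2.2 - t.2.1) * 25
      else if 9 ≤ t.2.1 ∧ t.2.1 < 19 ∧ 9 ≤ t.2.2 ∧ t.2.2 < 19 then payment + (t.2.2 - t.2.1) * 15
      else if 18 ≤ t.2.1 ∧ t.2.1 < 25 ∧ 18 ≤ t.2.2 ∧ t.2.2 < 25 then payment + (t.2.2 - t.2.1) * 20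
      else payment
    else payment) =
    payment + ((match pvBaseRate t.2.1 t.2.2 with
        | some r => (t.2.2 - t.2.1) * r
        | none => 0)
       + (if (pvBaseRate t.2.1 t.2.2).isSome && !pvIsWeekday t.1
          then 5 * (t.2.2 - t.2.1) else 0)) := by
  obtain ⟨d, s, e⟩ := t
  rw [pv_weekend_eq]
  exact pv_step_core payment s e (!pvIsWeekday d)

lemma pv_fold_eq (wh : List (String × Int × Int)) (p : Int) :
    wh.foldl (fun payment t =>
      if pvIsWeekend t.1 then
        if 0 ≤ t.2.1 ∧ t.2.1 < 9 ∧ 0 ≤ t.2.2 ∧ t.2.2 < 9 then payment + (t.2.2 - t.2.1) * 30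
        else if 9 ≤ t.2.1 ∧ t.2.1 < 19 ∧ 9 ≤ t.2.2 ∧ t.2.2 < 19 then payment + (t.2.2 - t.2.1) * 20
        else if 18 ≤ t.2.1 ∧ t.2.1 < 25 ∧ 18 ≤ t.2.2 ∧ t.2.2 < 25 then payment + (t.2.2 - t.2.1) * 25
        else payment
      else if !pvIsWeekend t.1 then
        if 0 ≤ t.2.1 ∧ t.2.1 < 9 ∧ 0 ≤ t.2.2 ∧ t.2.2 < 9 then payment + (t.2.2 - t.2.1) * 25
        else if 9 ≤ t.2.1 ∧ t.2.1 < 19 ∧ 9 ≤ t.2.2 ∧ t.2.2 < 19 then payment + (t.2.2 - t.2.1) * 15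
        else if 18 ≤ t.2.1 ∧ t.2.1 < 25 ∧ 18 ≤ t.2.2 ∧ t.2.2 < 25 then payment + (t.2.2 - t.2.1) * 20
        else payment
      else payment) p = p + calculate_payment_alt wh := by
  induction wh generalizing p with
  | nil => simp [calculate_payment_alt]
  | cons t rest ih =>
    rw [List.foldl_cons, ih, pv_step_eq, pv_alt_cons]
    ring

-- ===== VERDICT =====
theorem calculate_payment_spec : Claim_equal_calculate_payment := by
  intro wh _
  unfold Spec_calculate_payment calculate_payment
  rw [pv_fold_eq]
  ring
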